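-- pv_equiv track=rewrite | github.com/daikihashimoto/BWT_to_BBWT | cbwt_constr.py | lynPerm
-- ===== SOURCE A (Python) =====
-- def lynPerm(T):
-- 	for i in range(len(T)):
-- 		fulfill=True
-- 		S = T[i:]+T[:i]
-- 		for s in range(1, len(T)):
-- 			if S >= S[s:]: fulfill = False
-- 		if fulfill == True: break
-- 	if fulfill == True: return i
-- 	else: return -1
-- ===== SOURCE B (Python) =====
-- def lynPerm(T):
--     n = len(T)
--     best = 0
--     for i in range(1, n):
--         if T[i:] + T[:i] < T[best:] + T[:best]:
--             best = i
--     S = T[best:] + T[:best]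
--     for s in range(1, n):
--         if S >= S[s:]:
--             return -1
--     return best
-- ===== Notes on version B (the rewrite author's own statement) =====
-- stated objective: faster
-- what changed: Instead of testing every rotation against all of its suffixes (a quadratic check nested inside a linear scan over rotations), B finds the lexicographically least rotation in one pass and runs the Lyndon (smaller-than-every-proper-suffix) check once, only on that candidate.
import Mathlib
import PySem

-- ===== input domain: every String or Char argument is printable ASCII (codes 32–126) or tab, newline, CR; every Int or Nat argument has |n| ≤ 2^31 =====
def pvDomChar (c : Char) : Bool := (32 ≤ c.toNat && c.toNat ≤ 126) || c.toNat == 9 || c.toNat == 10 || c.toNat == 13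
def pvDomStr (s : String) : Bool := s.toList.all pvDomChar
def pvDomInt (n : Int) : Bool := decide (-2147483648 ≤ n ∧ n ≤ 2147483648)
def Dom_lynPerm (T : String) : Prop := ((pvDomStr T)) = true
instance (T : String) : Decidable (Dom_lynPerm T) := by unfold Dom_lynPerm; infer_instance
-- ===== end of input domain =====

-- B replaces A's scan of all n rotations, each tested against all of its proper suffixes, by one
-- pass that finds the lexicographically least rotation and a single Lyndon check on that candidate.

-- ===== PORT A =====
-- the rotation T[i:] + T[:i]; both Pythons build it with this very expression
def lynRot (tl : List Char) (i : Int) : List Char :=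
  PySem.List.slice tl (some i) none ++ PySem.List.slice tl none (some i)

-- A's inner flag loop: 'for s in range(1, len(T)): if S >= S[s:]: fulfill = False'
def lynFulfill (n : Int) (S : List Char) : Bool :=
  (PySem.List.pyRange 1 n 1).foldl
    (fun fulfill s => if PySem.List.slice S (some s) none ≤ S then false else fulfill) true

-- A's outer loop with its break/return: first i whose rotation fulfills, else the trailing -1
def lynLoopA (tl : List Char) (n : Int) : List Int → Int
  | [] => -1
  | i :: rest =>
    if lynFulfill n (lynRot tl i) then i else lynLoopA tl n rest

def lynPerm (T : String) : Int :=
  lynLoopA T.toList (PySem.Str.len T) (PySem.List.pyRange 0 (PySem.Str.len T) 1)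

-- ===== PORT B =====
-- B's single check with early 'return -1': 'for s in range(1, n): if S >= S[s:]: return -1'
def lynCheck (S : List Char) : List Int → Bool
  | [] => true
  | s :: rest => if PySem.List.slice S (some s) none ≤ S then false else lynCheck S rest

def lynPerm_alt (T : String) : Int :=
  let tl := T.toList
  let n := PySem.Str.len T
  let best := (PySem.List.pyRange 1 n 1).foldl
    (fun best i => if lynRot tl i < lynRot tl best then i else best) 0
  if lynCheck (lynRot tl best) (PySem.List.pyRange 1 n 1) then best else -1

-- ===== PRECONDITION & SPEC =====
-- Pre_ excludes only the empty string, on which A raises NameError ('fulfill' never assigned).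
def Pre_lynPerm (T : String) : Prop := T ≠ ""
instance (T : String) : Decidable (Pre_lynPerm T) := by unfold Pre_lynPerm; infer_instance
def pvWitness_lynPerm : String := "ab"

def Spec_lynPerm (T : String) (out : Int) : Prop := out = lynPerm_alt T
instance (T : String) (out : Int) : Decidable (Spec_lynPerm T out) := by unfold Spec_lynPerm; infer_instance

-- ===== CLAIM (what is proved, stated in full; the proofs are below) =====
def Claim_equal_lynPerm : Prop := ∀ (T : String), Dom_lynPerm T → Pre_lynPerm T → Spec_lynPerm T (lynPerm T)

-- ===== LEMMAS AND PROOFS =====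

-- rotation by a natural index, the form all reasoning uses
def lynRotN (tl : List Char) (k : Nat) : List Char := tl.drop k ++ tl.take k

-- 'rotation k of tl is a Lyndon word': strictly below each of its proper suffixes
def LynP (tl : List Char) (k : Nat) : Prop :=
  ∀ s : Nat, 1 ≤ s → s < tl.length → lynRotN tl k < (lynRotN tl k).drop s

theorem lynRot_cast (tl : List Char) (k : Nat) : lynRot tl (k : Int) = lynRotN tl k := by
  simp [lynRot, lynRotN, PySem.List.slice_from_natCast, PySem.List.slice_to_natCast]

theorem lynRotN_length (tl : List Char) (k : Nat) : (lynRotN tl k).length = tl.length := by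
  simp [lynRotN]; omega

theorem lynRotN_rotate (tl : List Char) (k : Nat) (h : k ≤ tl.length) :
    lynRotN tl k = tl.rotate k := (List.rotate_eq_drop_append_take h).symm

theorem lex_lt_append (u v w : List Char) (h : u < v) : u < v ++ w := by
  show List.Lex (· < ·) u (v ++ w)
  exact List.Lex.append_right _ _ (show List.Lex (· < ·) u v from h)

-- a Lyndon rotation is strictly below every OTHER rotation
theorem lyn_lt_all (tl : List Char) (k j : Nat) (hk : k < tl.length) (hj : j < tl.length)
    (hne : j ≠ k) (hLyn : LynP tl k) : lynRotN tl k < lynRotN tl j := by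
  set n := tl.length with hn
  have hnpos : 0 < n := by omega
  set s := (n + j - k) % n with hs
  have hslt : s < n := Nat.mod_lt _ hnpos
  have hs1 : 1 ≤ s := by
    rcases Nat.eq_zero_or_pos s with h0 | h1
    · exfalso
      have hdvd : n ∣ (n + j - k) := Nat.dvd_iff_mod_eq_zero.mpr (hs ▸ h0)
      obtain ⟨c, hc⟩ := hdvd
      have h2 : 2 ≤ c → n * 2 ≤ n * c := fun h => Nat.mul_le_mul_left n h
      rcases c with _ | _ | c
      · omega
      · omega
      · have := h2 (by omega); omega
    · exact h1
  have hrotj : lynRotN tl j = (lynRotN tl k).drop s ++ (lynRotN tl k).take s := by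
    have h1 : (lynRotN tl k).drop s ++ (lynRotN tl k).take s = (lynRotN tl k).rotate s :=
      (List.rotate_eq_drop_append_take (by rw [lynRotN_length]; omega)).symm
    rw [h1, lynRotN_rotate tl k (le_of_lt hk), List.rotate_rotate,
      lynRotN_rotate tl j (le_of_lt hj)]
    have hmod : (k + s) % n = j := by
      rw [hs, Nat.add_mod_mod]
      have he : k + (n + j - k) = j + n := by omega
      rw [he, Nat.add_mod_right]
      exact Nat.mod_eq_of_lt hj
    rw [← List.rotate_mod tl (k + s)]
    rw [show (k + s) % tl.length = j from hmod]
  rw [hrotj]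
  exact lex_lt_append _ _ _ (hLyn s hs1 hslt)

-- at most one rotation is Lyndon
theorem lyn_unique (tl : List Char) (k j : Nat) (hk : k < tl.length) (hj : j < tl.length)
    (h1 : LynP tl k) (h2 : LynP tl j) : k = j := by
  by_contra hne
  exact lt_asymm (lyn_lt_all tl k j hk hj (fun h => hne h.symm) h1)
    (lyn_lt_all tl j k hj hk hne h2)

-- A's flag fold from false stays false
theorem fulfill_foldl_false (S : List Char) (l : List Int) :
    l.foldl (fun fulfill s => if PySem.List.slice S (some s) none ≤ S then false else fulfill)
      false = false := by
  induction l with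
  | nil => rfl
  | cons a l ih =>
    rw [List.foldl_cons]
    show l.foldl _ (if PySem.List.slice S (some a) none ≤ S then false else false) = false
    rw [ite_self]
    exact ih

theorem fulfill_foldl_iff (S : List Char) (l : List Int) :
    (l.foldl (fun fulfill s => if PySem.List.slice S (some s) none ≤ S then false else fulfill)
      true = true) ↔ ∀ s ∈ l, ¬ (PySem.List.slice S (some s) none ≤ S) := by
  induction l with
  | nil => simp
  | cons a l ih =>
    rw [List.foldl_cons]
    show (l.foldl _ (if PySem.List.slice S (some a) none ≤ S then false else true) = true) ↔ _
    rw [List.forall_mem_cons]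
    by_cases h : PySem.List.slice S (some a) none ≤ S
    · rw [if_pos h, fulfill_foldl_false]
      constructor
      · intro hcontra; cases hcontra
      · intro hall; exact (hall.1 h).elim
    · rw [if_neg h, ih]
      exact (and_iff_right h).symm

theorem lynCheck_iff (S : List Char) (l : List Int) :
    lynCheck S l = true ↔ ∀ s ∈ l, ¬ (PySem.List.slice S (some s) none ≤ S) := by
  induction l with
  | nil => simp [lynCheck]
  | cons a l ih =>
    rw [lynCheck, List.forall_mem_cons]
    by_cases h : PySem.List.slice S (some a) none ≤ S
    · rw [if_pos h]
      constructor
      · intro hcontra; cases hcontra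
      · intro hall; exact (hall.1 h).elim
    · rw [if_neg h, ih]
      exact (and_iff_right h).symm

-- both boolean checks decide LynP for an in-range rotation index
theorem suffix_cond_iff_lyn (tl : List Char) (k : Nat) (_hk : k < tl.length) :
    (∀ s ∈ PySem.List.pyRange 1 (tl.length : Int) 1,
        ¬ (PySem.List.slice (lynRotN tl k) (some s) none ≤ lynRotN tl k)) ↔ LynP tl k := by
  constructor
  · intro h s hs1 hsn
    have hmem : (s : Int) ∈ PySem.List.pyRange 1 (tl.length : Int) 1 := by
      rw [PySem.List.mem_pyRange_one]
      constructor <;> [exact_mod_cast hs1; exact_mod_cast hsn]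
    have := h _ hmem
    rw [PySem.List.slice_from_natCast] at this
    exact lt_of_not_ge this
  · intro h s hs
    rw [PySem.List.mem_pyRange_one] at hs
    have h0 : (0 : Int) ≤ s := by omega
    rw [PySem.List.slice_from _ h0]
    have hb1 : 1 ≤ s.toNat := by omega
    have hb2 : s.toNat < tl.length := by omega
    exact not_le_of_gt (h s.toNat hb1 hb2)

theorem fulfill_iff_lyn (tl : List Char) (k : Nat) (hk : k < tl.length) :
    lynFulfill (tl.length : Int) (lynRot tl (k : Int)) = true ↔ LynP tl k := by
  rw [lynFulfill, lynRot_cast, fulfill_foldl_iff]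
  exact suffix_cond_iff_lyn tl k hk

theorem check_iff_lyn (tl : List Char) (k : Nat) (hk : k < tl.length) :
    lynCheck (lynRotN tl k) (PySem.List.pyRange 1 (tl.length : Int) 1) = true ↔ LynP tl k := by
  rw [lynCheck_iff]
  exact suffix_cond_iff_lyn tl k hk

-- A's outer loop: -1 when no element fulfills
theorem loopA_none (tl : List Char) (n : Int) (l : List Int)
    (h : ∀ i ∈ l, lynFulfill n (lynRot tl i) = false) : lynLoopA tl n l = -1 := by
  induction l with
  | nil => rfl
  | cons a l ih =>
    rw [lynLoopA, h a (List.mem_cons_self ..), if_neg Bool.false_ne_true]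
    exact ih fun i hi => h i (List.mem_cons_of_mem _ hi)

-- A's outer loop: the first fulfilling element is returned
theorem loopA_first (tl : List Char) (n : Int) (l1 l2 : List Int) (k : Int)
    (h1 : ∀ i ∈ l1, lynFulfill n (lynRot tl i) = false)
    (hk : lynFulfill n (lynRot tl k) = true) : lynLoopA tl n (l1 ++ k :: l2) = k := by
  induction l1 with
  | nil => rw [List.nil_append, lynLoopA, hk, if_pos rfl]
  | cons a l ih =>
    rw [List.cons_append, lynLoopA, h1 a (List.mem_cons_self ..), if_neg Bool.false_ne_true]
    exact ih fun i hi => h1 i (List.mem_cons_of_mem _ hi)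

-- B's min fold, modelled on natural indices
def lynBestN (tl : List Char) (l : List Nat) (m : Nat) : Nat :=
  l.foldl (fun b k => if lynRotN tl (1 + k) < lynRotN tl b then 1 + k else b) m

theorem lynBestN_cons (tl : List Char) (a : Nat) (l : List Nat) (m : Nat) :
    lynBestN tl (a :: l) m
      = lynBestN tl l (if lynRotN tl (1 + a) < lynRotN tl m then 1 + a else m) := rfl

theorem bestFold_cast (tl : List Char) (l : List Nat) (m : Nat) :
    ((l.map (fun k : Nat => (1 : Int) + (k : Int))).foldl
      (fun best i => if lynRot tl i < lynRot tl best then i else best) (m : Int))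
    = (lynBestN tl l m : Int) := by
  induction l generalizing m with
  | nil => rfl
  | cons a l ih =>
    rw [List.map_cons, List.foldl_cons, lynBestN_cons]
    show ((l.map _).foldl _
      (if lynRot tl (1 + (a : Int)) < lynRot tl (m : Int) then 1 + (a : Int) else (m : Int))) = _
    have hc : (1 : Int) + (a : Int) = ((1 + a : Nat) : Int) := by push_cast; ring
    rw [hc, lynRot_cast, lynRot_cast]
    by_cases hlt : lynRotN tl (1 + a) < lynRotN tl m
    · rw [if_pos hlt, if_pos hlt]; exact ih _
    · rw [if_neg hlt, if_neg hlt]; exact ih _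

theorem bestN_inv (tl : List Char) (l : List Nat) (m : Nat) (hm : m < tl.length)
    (hl : ∀ k ∈ l, 1 + k < tl.length) :
    lynBestN tl l m < tl.length ∧
      ∀ j, (j = m ∨ ∃ k ∈ l, j = 1 + k) → ¬ (lynRotN tl j < lynRotN tl (lynBestN tl l m)) := by
  induction l generalizing m with
  | nil =>
    refine ⟨hm, ?_⟩
    rintro j (rfl | ⟨k, hk, rfl⟩)
    · exact lt_irrefl _
    · exact absurd hk (List.not_mem_nil)
  | cons a l ih =>
    rw [lynBestN_cons]
    by_cases hlt : lynRotN tl (1 + a) < lynRotN tl m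
    · rw [if_pos hlt]
      obtain ⟨hlen, hmin⟩ := ih (1 + a) (hl a (List.mem_cons_self ..))
        (fun k hk => hl k (List.mem_cons_of_mem _ hk))
      refine ⟨hlen, ?_⟩
      rintro j (rfl | ⟨k, hk, rfl⟩)
      · intro hj
        have hres := hmin (1 + a) (Or.inl rfl)
        exact hres (lt_trans hlt hj)
      · rcases List.mem_cons.mp hk with rfl | hk
        · exact hmin _ (Or.inl rfl)
        · exact hmin _ (Or.inr ⟨k, hk, rfl⟩)
    · rw [if_neg hlt]
      obtain ⟨hlen, hmin⟩ := ih m hm (fun k hk => hl k (List.mem_cons_of_mem _ hk))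
      refine ⟨hlen, ?_⟩
      rintro j (rfl | ⟨k, hk, rfl⟩)
      · exact hmin _ (Or.inl rfl)
      · rcases List.mem_cons.mp hk with rfl | hk
        · intro hj
          have hres := hmin m (Or.inl rfl)
          have h1 : lynRotN tl m ≤ lynRotN tl (1 + k) := le_of_not_gt hlt
          exact hres (lt_of_le_of_lt h1 hj)
        · exact hmin _ (Or.inr ⟨k, hk, rfl⟩)

-- every index below n is covered by the fold's index set {0} ∪ {1+k : k < n-1}
theorem best_min (tl : List Char) (hpos : 0 < tl.length) :
    lynBestN tl (List.range (tl.length - 1)) 0 < tl.length ∧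
      ∀ j < tl.length,
        ¬ (lynRotN tl j < lynRotN tl (lynBestN tl (List.range (tl.length - 1)) 0)) := by
  obtain ⟨hlen, hmin⟩ := bestN_inv tl (List.range (tl.length - 1)) 0 hpos
    (fun k hk => by rw [List.mem_range] at hk; omega)
  refine ⟨hlen, fun j hj => ?_⟩
  rcases Nat.eq_zero_or_pos j with rfl | hj1
  · exact hmin 0 (Or.inl rfl)
  · exact hmin j (Or.inr ⟨j - 1, by rw [List.mem_range]; omega, by omega⟩)

-- if some rotation is Lyndon, the fold's result is that very index
theorem best_eq_lyn (tl : List Char) (k : Nat) (hk : k < tl.length) (hLyn : LynP tl k) :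
    lynBestN tl (List.range (tl.length - 1)) 0 = k := by
  obtain ⟨hlen, hmin⟩ := best_min tl (by omega)
  by_contra hne
  exact hmin k hk (lyn_lt_all tl k _ hk hlen hne hLyn)

-- the two pyRange lists, rewritten to mapped Nat ranges
theorem pyRange_zero_eq (n : Nat) :
    PySem.List.pyRange 0 (n : Int) 1 = (List.range n).map (fun k : Nat => (k : Int)) := by
  rw [PySem.List.pyRange_one]
  simp

theorem pyRange_one_eq (n : Nat) :
    PySem.List.pyRange 1 (n : Int) 1
      = (List.range (n - 1)).map (fun k : Nat => (1 : Int) + (k : Int)) := by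
  have h1 : ((n : Int) - 1).toNat = n - 1 := by omega
  rw [PySem.List.pyRange_one, h1]

-- ===== VERDICT (by name: the statement is the Claim_ definition above) =====
theorem lynPerm_spec : Claim_equal_lynPerm := by
  intro T _ hpre
  unfold Spec_lynPerm
  have hne : T.toList ≠ [] := fun hl => hpre (String.toList_eq_nil_iff.mp hl)
  have hpos : 0 < T.toList.length := List.length_pos_iff.mpr hne
  have halt : lynPerm_alt T
      = (if lynCheck (lynRotN T.toList (lynBestN T.toList (List.range (T.toList.length - 1)) 0))
            (PySem.List.pyRange 1 (T.toList.length : Int) 1)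
         then ((lynBestN T.toList (List.range (T.toList.length - 1)) 0 : Nat) : Int) else -1) := by
    unfold lynPerm_alt
    rw [PySem.Str.len_eq]
    simp only
    rw [pyRange_one_eq, show (0 : Int) = ((0 : Nat) : Int) from rfl, bestFold_cast, lynRot_cast,
      ← pyRange_one_eq]
  have ha : lynPerm T = lynLoopA T.toList (T.toList.length : Int)
      ((List.range T.toList.length).map (fun k : Nat => (k : Int))) := by
    unfold lynPerm
    rw [PySem.Str.len_eq, pyRange_zero_eq]
  rw [ha, halt]
  set tl := T.toList with htl
  set n := tl.length with hn
  set b := lynBestN tl (List.range (n - 1)) 0 with hb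
  obtain ⟨hblen, hbmin⟩ := best_min tl hpos
  rw [← hb] at hblen hbmin
  by_cases hLb : LynP tl b
  · -- the minimal rotation is Lyndon: both sides return b
    rw [if_pos ((check_iff_lyn tl b hblen).mpr hLb)]
    have hsplit : List.range n
        = List.range b ++ (b :: (List.range (n - b - 1)).map (fun x => b + 1 + x)) := by
      have h2 : n = b + ((n - b - 1) + 1) := by omega
      conv_lhs => rw [h2]
      rw [List.range_add, List.range_succ_eq_map, List.map_cons, List.map_map]
      congr 1
      congr 1
      exact List.map_congr_left fun x _ => by simp [Nat.succ_eq_add_one]; omega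
    rw [hsplit, List.map_append, List.map_cons]
    apply loopA_first
    · intro i hi
      simp only [List.mem_map, List.mem_range] at hi
      obtain ⟨j, hj, rfl⟩ := hi
      rw [← Bool.not_eq_true]
      intro hcontra
      have hLj : LynP tl j := (fulfill_iff_lyn tl j (by omega)).mp hcontra
      have := lyn_unique tl b j hblen (by omega) hLb hLj
      omega
    · exact (fulfill_iff_lyn tl b hblen).mpr hLb
  · -- no rotation is Lyndon: both sides return -1
    rw [if_neg fun h => hLb ((check_iff_lyn tl b hblen).mp h)]
    apply loopA_none
    intro i hi
    simp only [List.mem_map, List.mem_range] at hi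
    obtain ⟨j, hj, rfl⟩ := hi
    rw [← Bool.not_eq_true]
    intro hcontra
    have hLj : LynP tl j := (fulfill_iff_lyn tl j hj).mp hcontra
    exact hLb (by rw [hb, best_eq_lyn tl j hj hLj]; exact hLj)
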